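-- pv_equiv track=rewrite | github.com/EliPreston/Python-Mini-Projects | Python Problems 109/problems.py | taxi_zum_zum
-- ===== SOURCE A (Python) =====
-- def taxi_zum_zum(moves):
--
--     initialPos =[0, 0]
--     moveDirectionIndex = 1
--
--     for i in moves:
--         if i == 'R':
--             moveDirectionIndex += 1
--             if moveDirectionIndex == 4:
--                 moveDirectionIndex = 0
--         elif i == 'L':
--             moveDirectionIndex -= 1
--             if moveDirectionIndex == -1:
--                 moveDirectionIndex = 3
--
--         elif i == 'F':
--             if moveDirectionIndex == 1:
--                 initialPos[1] += 1
--             elif moveDirectionIndex == 2: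
--                 initialPos[0] += 1
--             elif moveDirectionIndex == 0:
--                 initialPos[0] -= 1
--             elif moveDirectionIndex == 3:
--                 initialPos[1] -= 1
--
--     return (initialPos[0], initialPos[1])
-- ===== SOURCE B (Python) =====
-- def taxi_zum_zum(moves):
--     # Stage 1: per-character turn deltas, then prefix-sum them to get the
--     # (unreduced) heading index in effect at each step.
--     turns = [(c == 'R') - (c == 'L') for c in moves]
--     headings = []
--     t = 1
--     for d in turns:
--         t += d
--         headings.append(t)
--     # Stage 2: histogram the forward steps by heading mod 4.
--     counts = [0, 0, 0, 0]
--     for c, h in zip(moves, headings):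
--         if c == 'F':
--             counts[h % 4] += 1
--     # Closed-form combination: heading 2 = +x, 0 = -x, 1 = +y, 3 = -y.
--     return (counts[2] - counts[0], counts[1] - counts[3])
-- ===== Notes on version B (the rewrite author's own statement) =====
-- stated objective: alternative
-- what changed: B replaces A's step-by-step position simulation with a staged counting algorithm: map each character to a turn delta, prefix-sum the deltas to get the heading at every step, histogram the forward steps by heading mod 4, and obtain the final position as a closed-form linear combination of the four counts; no position is maintained during any pass.
import Mathlib
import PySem

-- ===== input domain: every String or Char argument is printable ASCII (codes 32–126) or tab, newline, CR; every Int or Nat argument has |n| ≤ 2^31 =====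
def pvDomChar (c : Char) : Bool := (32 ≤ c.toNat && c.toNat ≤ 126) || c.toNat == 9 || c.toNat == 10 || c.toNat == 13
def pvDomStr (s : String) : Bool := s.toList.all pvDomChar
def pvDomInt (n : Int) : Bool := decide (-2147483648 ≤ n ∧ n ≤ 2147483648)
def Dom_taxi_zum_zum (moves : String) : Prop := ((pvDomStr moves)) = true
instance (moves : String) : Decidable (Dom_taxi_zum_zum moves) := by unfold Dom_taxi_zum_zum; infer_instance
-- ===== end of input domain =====

-- B replaces A's step-by-step position simulation by staged counting: turn deltas,
-- prefix-summed headings, a histogram of 'F' steps per heading mod 4, and a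
-- closed-form combination of the four counts (alternative decomposition, same O(n)).

-- ===== PORT A =====
-- state: (initialPos, moveDirectionIndex)
def taxiStepA (st : (Int × Int) × Int) (i : Char) : (Int × Int) × Int :=
  let pos := st.1; let idx := st.2
  if i = 'R' then
    let idx' := idx + 1
    (pos, if idx' = 4 then 0 else idx')
  else if i = 'L' then
    let idx' := idx - 1
    (pos, if idx' = -1 then 3 else idx')
  else if i = 'F' then
    if idx = 1 then ((pos.1, pos.2 + 1), idx)
    else if idx = 2 then ((pos.1 + 1, pos.2), idx)
    else if idx = 0 then ((pos.1 - 1, pos.2), idx)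
    else if idx = 3 then ((pos.1, pos.2 - 1), idx)
    else (pos, idx)
  else (pos, idx)

def taxi_zum_zum (moves : String) : Int × Int :=
  (moves.toList.foldl taxiStepA ((0, 0), 1)).1

-- ===== PORT B =====
-- stage 1a: (c == 'R') - (c == 'L')
def taxiTurn (c : Char) : Int :=
  (if c = 'R' then 1 else 0) - (if c = 'L' then 1 else 0)

-- stage 1b: prefix sums of the turn deltas (heading in effect at each step)
def taxiHeads (t : Int) : List Int → List Int
  | [] => []
  | d :: ds => (t + d) :: taxiHeads (t + d) ds

-- counts[0..3] as a 4-tuple; increment the component selected by h % 4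
def taxiBump (cs : Int × Int × Int × Int) (m : Int) : Int × Int × Int × Int :=
  if m = 0 then (cs.1 + 1, cs.2.1, cs.2.2.1, cs.2.2.2)
  else if m = 1 then (cs.1, cs.2.1 + 1, cs.2.2.1, cs.2.2.2)
  else if m = 2 then (cs.1, cs.2.1, cs.2.2.1 + 1, cs.2.2.2)
  else (cs.1, cs.2.1, cs.2.2.1, cs.2.2.2 + 1)

-- stage 2: histogram the 'F' steps by heading mod 4
def taxiCountStep (cs : Int × Int × Int × Int) (p : Char × Int) : Int × Int × Int × Int :=
  if p.1 = 'F' then taxiBump cs (PySem.Int.mod p.2 4) else cs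

def taxi_zum_zum_alt (moves : String) : Int × Int :=
  let l := moves.toList
  let turns := l.map taxiTurn
  let headings := taxiHeads 1 turns
  let counts := (l.zip headings).foldl taxiCountStep (0, 0, 0, 0)
  (counts.2.2.1 - counts.1, counts.2.1 - counts.2.2.2)

-- ===== PRECONDITION & SPEC =====
def Spec_taxi_zum_zum (moves : String) (out : Int × Int) : Prop := out = taxi_zum_zum_alt moves
instance (moves : String) (out : Int × Int) : Decidable (Spec_taxi_zum_zum moves out) := by unfold Spec_taxi_zum_zum; infer_instance

-- ===== CLAIM (what is proved, stated in full; the proofs are below) =====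
def Claim_equal_taxi_zum_zum : Prop := ∀ (moves : String), Dom_taxi_zum_zum moves → Spec_taxi_zum_zum moves (taxi_zum_zum moves)

-- ===== LEMMAS AND PROOFS =====

-- position encoded by a count 4-tuple, relative to an origin
def taxiEval (o : Int × Int) (cs : Int × Int × Int × Int) : Int × Int :=
  (o.1 + cs.2.2.1 - cs.1, o.2 + cs.2.1 - cs.2.2.2)

theorem taxi_fold_rel (l : List Char) (t : Int) (o : Int × Int) (cs : Int × Int × Int × Int) :
    (l.foldl taxiStepA (taxiEval o cs, t % 4)).1
      = taxiEval o ((l.zip (taxiHeads t (l.map taxiTurn))).foldl taxiCountStep cs) := by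
  induction l generalizing t cs with
  | nil => rfl
  | cons c l ih =>
    have hb : t % 4 = 0 ∨ t % 4 = 1 ∨ t % 4 = 2 ∨ t % 4 = 3 := by omega
    simp only [List.map_cons, taxiHeads, List.zip_cons_cons, List.foldl_cons]
    by_cases hR : c = 'R'
    · subst hR
      have h1 : taxiStepA (taxiEval o cs, t % 4) 'R' = (taxiEval o cs, (t + 1) % 4) := by
        simp only [taxiStepA]
        have : (t + 1) % 4 = (t % 4 + 1) % 4 := by omega
        rcases hb with h | h | h | h <;> simp [h, this]
      have h2 : taxiCountStep cs ('R', t + taxiTurn 'R') = cs := by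
        simp [taxiCountStep]
      rw [h1, h2]
      simpa [taxiTurn] using ih (t + 1) cs
    · by_cases hL : c = 'L'
      · subst hL
        have h1 : taxiStepA (taxiEval o cs, t % 4) 'L' = (taxiEval o cs, (t - 1) % 4) := by
          simp only [taxiStepA]
          have : (t - 1) % 4 = (t % 4 + 3) % 4 := by omega
          rcases hb with h | h | h | h <;> simp [h, this]
        have h2 : taxiCountStep cs ('L', t + taxiTurn 'L') = cs := by
          simp [taxiCountStep]
        rw [h1, h2]
        simpa [taxiTurn] using ih (t - 1) cs
      · by_cases hF : c = 'F'
        · subst hF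
          have hturn : taxiTurn 'F' = 0 := by decide
          have hmod : PySem.Int.mod (t + 0) 4 = t % 4 := by
            simp
          have hstep : taxiCountStep cs ('F', t + taxiTurn 'F') = taxiBump cs (t % 4) := by
            simp [taxiCountStep, hturn]
          have h1 : taxiStepA (taxiEval o cs, t % 4) 'F'
              = (taxiEval o (taxiBump cs (t % 4)), t % 4) := by
            rcases hb with h | h | h | h <;>
              simp [taxiStepA, taxiEval, taxiBump, h] <;> ring_nf
          rw [h1, hstep]
          simpa [hturn] using ih t (taxiBump cs (t % 4))
        · have h1 : taxiStepA (taxiEval o cs, t % 4) c = (taxiEval o cs, t % 4) := by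
            simp [taxiStepA, hR, hL, hF]
          have h2 : taxiCountStep cs (c, t + taxiTurn c) = cs := by
            simp [taxiCountStep, hF]
          have hturn : taxiTurn c = 0 := by simp [taxiTurn, hR, hL]
          rw [h1, h2]
          simpa [hturn] using ih t cs

-- ===== VERDICT (by name: the statement is the Claim_ definition above) =====
theorem taxi_zum_zum_spec : Claim_equal_taxi_zum_zum := by
  intro moves _
  unfold Spec_taxi_zum_zum taxi_zum_zum taxi_zum_zum_alt
  have := taxi_fold_rel moves.toList 1 (0, 0) (0, 0, 0, 0)
  simpa [taxiEval] using this
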